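-- pv_equiv track=rewrite | github.com/CERT-Polska/n6 | N6Lib-py2/n6lib/auth_db/_ddl_naming_convention.py | _iter_first_characters_of_words_in
-- ===== SOURCE A (Python) =====
-- def _iter_first_characters_of_words_in(name):
--     name = name.replace('.', ' ')
--     name = name.replace('_', ' ')
--     words_in_name = name.split()
--     for word in words_in_name:
--         assert word
--         first_char = word[0]
--         yield first_char
-- ===== SOURCE B (Python) =====
-- def _iter_first_characters_of_words_in(name):
--     # Single left-to-right scan: '.', '_' and whitespace all act as word
--     # separators (A turns '.'/'_' into spaces first); yield the first
--     # character of each maximal run of non-separator characters.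
--     prev_was_sep = True
--     for ch in name:
--         if ch == '.' or ch == '_' or ch.isspace():
--             prev_was_sep = True
--         elif prev_was_sep:
--             yield ch
--             prev_was_sep = False
-- ===== Notes on version B (the rewrite author's own statement) =====
-- stated objective: simpler
-- what changed: Replaces the replace+replace+split()+loop pipeline by one character scan with a prev_was_sep flag, treating dot, underscore and whitespace directly as separators and yielding the first char of each non-separator run, with no intermediate strings or word list.
import Mathlib
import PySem

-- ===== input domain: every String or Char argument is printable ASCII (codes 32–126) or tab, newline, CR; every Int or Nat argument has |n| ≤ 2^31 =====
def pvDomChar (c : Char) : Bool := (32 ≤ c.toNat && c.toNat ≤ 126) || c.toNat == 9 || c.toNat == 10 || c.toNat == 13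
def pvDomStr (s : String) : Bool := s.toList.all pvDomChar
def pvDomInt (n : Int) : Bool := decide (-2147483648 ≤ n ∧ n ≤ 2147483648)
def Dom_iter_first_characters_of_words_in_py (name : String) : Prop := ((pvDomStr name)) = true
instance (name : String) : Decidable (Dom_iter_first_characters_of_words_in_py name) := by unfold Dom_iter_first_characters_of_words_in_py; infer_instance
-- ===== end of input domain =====

-- B replaces A's replace+replace+split()+loop pipeline by one character scan with a
-- prev_was_sep flag (simpler, single pass); A and B are proved to return equal lists.


-- ===== PORT A =====
-- name.replace('.',' '); name.replace('_',' '); split(); yield word[0] for each word.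
-- split() words are never empty, so word[0] always exists; the .getD "" default is never taken.
def iter_first_characters_of_words_in_py (name : String) : List String :=
  let name1 := PySem.Str.replace name "." " "
  let name2 := PySem.Str.replace name1 "_" " "
  let words_in_name := PySem.Str.split₀ name2
  words_in_name.map (fun word => ((PySem.Str.pyGet? word 0).map (fun c => String.mk [c])).getD "")

-- ===== PORT B =====
-- single scan with a prev_was_sep flag over the raw characters
def altGo : List Char → Bool → List String
  | [], _ => []
  | c :: rest, prev =>
    if c = '.' ∨ c = '_' ∨ PySem.Chars.isspace c then altGo rest true
    else if prev then String.mk [c] :: altGo rest false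
    else altGo rest false

def iter_first_characters_of_words_in_py_alt (name : String) : List String :=
  altGo name.toList true

-- ===== PRECONDITION & SPEC =====
def Spec_iter_first_characters_of_words_in_py (name : String) (out : List String) : Prop := out = iter_first_characters_of_words_in_py_alt name
instance (name : String) (out : List String) : Decidable (Spec_iter_first_characters_of_words_in_py name out) := by unfold Spec_iter_first_characters_of_words_in_py; infer_instance

-- ===== CLAIM (what is proved, stated in full; the proofs are below) =====
def Claim_equal_iter_first_characters_of_words_in_py : Prop := ∀ (name : String), Dom_iter_first_characters_of_words_in_py name → Spec_iter_first_characters_of_words_in_py name (iter_first_characters_of_words_in_py name)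

-- ===== LEMMAS AND PROOFS =====

-- the substitution performed by the two replaces, per character
def pvSubst (c : Char) : Char := if c = '.' then ' ' else if c = '_' then ' ' else c

-- first character of a word, as A's map body computes it
def pvFirst (w : List Char) : String :=
  ((PySem.List.pyGet? w 0).map (fun c => String.mk [c])).getD ""

-- single-character replace is a map
theorem replace_go_single (o n : Char) :
    ∀ (l : List Char) (fuel : Nat) (acc : List Char), l.length ≤ fuel →
      PySem.Chars.replace.go [o] [n] fuel l acc
        = acc.reverse ++ l.map (fun c => if c = o then n else c) := by
  intro l
  induction l with
  | nil => intro fuel acc _; cases fuel <;> simp [PySem.Chars.replace.go]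
  | cons c t ih =>
    intro fuel acc h
    cases fuel with
    | zero => simp at h
    | succ fuel =>
      have h' : t.length ≤ fuel := by simpa using h
      simp only [PySem.Chars.replace.go, List.isPrefixOf]
      by_cases hc : o = c
      · rw [if_pos (by simp [hc])]
        have hd : List.drop [o].length (c :: t) = t := rfl
        rw [hd, ih fuel _ h']
        simp [hc.symm]
      · rw [if_neg (by simp [hc])]
        rw [ih fuel _ h']
        have hcc : ¬ c = o := fun e => hc e.symm
        simp [hcc]

theorem replace_single (o n : Char) (s : List Char) :
    PySem.Chars.replace s [o] [n] = s.map (fun c => if c = o then n else c) := by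
  simp [PySem.Chars.replace, replace_go_single o n s s.length [] le_rfl]

-- a character after pvSubst is whitespace iff it was '.', '_' or whitespace
theorem isspace_subst (c : Char) :
    PySem.Chars.isspace (pvSubst c) = true ↔ (c = '.' ∨ c = '_' ∨ PySem.Chars.isspace c = true) := by
  by_cases h1 : c = '.'
  · subst h1; simp [pvSubst]; decide
  · by_cases h2 : c = '_'
    · subst h2; simp [pvSubst]; decide
    · simp [pvSubst, h1, h2]

-- pvFirst of a word being extended in reversed form
theorem pvFirst_snoc (c : Char) (cur : List Char) :
    pvFirst (c :: cur).reverse = if cur.isEmpty then String.mk [c] else pvFirst cur.reverse := by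
  by_cases hc : cur.isEmpty
  · have : cur = [] := by simpa [List.isEmpty_iff] using hc
    subst this
    simp [pvFirst, PySem.List.pyGet?, PySem.List.pyIdx?]
  · have hne : cur.reverse ≠ [] := by
      simp only [List.isEmpty_iff] at hc; simpa using hc
    obtain ⟨d, t, ht⟩ := List.exists_cons_of_ne_nil hne
    have h0 : (0:Int) ≤ (t.length:Int) + 1 := by positivity
    simp [hc, List.reverse_cons, ht, pvFirst, PySem.List.pyGet?, PySem.List.pyIdx?, h0]

-- main loop correspondence: split₀.go on the substituted characters vs altGo on the raw ones
theorem go_corr : ∀ (l cur : List Char) (acc : List (List Char)),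
    (PySem.Chars.split₀.go (l.map pvSubst) cur acc).map pvFirst
      = acc.reverse.map pvFirst
        ++ (if cur.isEmpty then altGo l true else pvFirst cur.reverse :: altGo l false)
  | [], cur, acc => by
    by_cases h : cur.isEmpty <;>
      simp [PySem.Chars.split₀.go, altGo, h]
  | c :: rest, cur, acc => by
    simp only [List.map_cons, PySem.Chars.split₀.go]
    by_cases hsep : c = '.' ∨ c = '_' ∨ PySem.Chars.isspace c = true
    · have hs : PySem.Chars.isspace (pvSubst c) = true := (isspace_subst c).mpr hsep
      rw [if_pos hs]
      by_cases hc : cur.isEmpty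
      · rw [if_pos hc, go_corr rest [] acc]
        simp [altGo, hsep, hc]
      · rw [if_neg hc, go_corr rest [] (cur.reverse :: acc)]
        simp [altGo, hsep, hc]
    · have hs : ¬ (PySem.Chars.isspace (pvSubst c) = true) := fun h => hsep ((isspace_subst c).mp h)
      have hid : pvSubst c = c := by
        push_neg at hsep
        simp [pvSubst, hsep.1, hsep.2.1]
      rw [if_neg hs, hid, go_corr rest (c :: cur) acc]
      rw [pvFirst_snoc]
      by_cases hc : cur.isEmpty <;> simp [altGo, hsep, hc]

-- Str.pyGet? factors through toList, so A's map body is pvFirst ∘ toList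
theorem strFirst_eq (w : String) :
    ((PySem.Str.pyGet? w 0).map (fun c => String.mk [c])).getD "" = pvFirst w.toList := by
  simp [PySem.Str.pyGet?, PySem.Chars.pyGet?, pvFirst]

-- ===== VERDICT (by name: the statement is the Claim_ definition above) =====
theorem iter_first_characters_of_words_in_py_spec : Claim_equal_iter_first_characters_of_words_in_py := by
  intro name _
  unfold Spec_iter_first_characters_of_words_in_py
  unfold iter_first_characters_of_words_in_py iter_first_characters_of_words_in_py_alt
  have hlist :
      (PySem.Str.replace (PySem.Str.replace name "." " ") "_" " ").toList
        = name.toList.map pvSubst := by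
    rw [PySem.Str.toList_replace, PySem.Str.toList_replace]
    show PySem.Chars.replace (PySem.Chars.replace name.toList ['.'] [' ']) ['_'] [' ']
        = name.toList.map pvSubst
    rw [replace_single, replace_single, List.map_map]
    apply List.map_congr_left
    intro c _
    by_cases h1 : c = '.'
    · subst h1; decide
    · by_cases h2 : c = '_'
      · subst h2; decide
      · simp [pvSubst, h1, h2]
  calc (PySem.Str.split₀ (PySem.Str.replace (PySem.Str.replace name "." " ") "_" " ")).map
          (fun word => ((PySem.Str.pyGet? word 0).map (fun c => String.mk [c])).getD "")
      = (PySem.Str.split₀ (PySem.Str.replace (PySem.Str.replace name "." " ") "_" " ")).map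
          (fun word => pvFirst word.toList) := by
        apply List.map_congr_left; intro w _; exact strFirst_eq w
    _ = ((PySem.Str.split₀ (PySem.Str.replace (PySem.Str.replace name "." " ") "_" " ")).map
          String.toList).map pvFirst := by rw [List.map_map]; rfl
    _ = (PySem.Chars.split₀ (name.toList.map pvSubst)).map pvFirst := by
        rw [PySem.Str.split₀_map_toList, hlist]
    _ = altGo name.toList true := by
        rw [PySem.Chars.split₀, go_corr]; simp
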